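-- pv_equiv track=rewrite | github.com/ryuan/gpt-product-data-enricher | tag_parsor.py | __fields_matching_any_keywords
-- ===== SOURCE A (Python) =====
-- from typing import List, Tuple, Optional
--
-- def __fields_matching_any_keywords(keywords: List[str], fields: List[str]) -> List[str]:
--     """
--     Return fields that contain ANY of the keywords as substrings (case-insensitive), preserving fields order and deduping.
--     """
--
--     seen = set()
--     out: List[str] = []
--     lower_fields = [(f, f.casefold()) for f in fields]
--     lowers = [k.casefold() for k in keywords]
--
--     for f_orig, f_low in lower_fields:
--         if any(k in f_low for k in lowers):
--             if f_orig not in seen: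
--                 seen.add(f_orig)
--                 out.append(f_orig)
--
--     return out
-- ===== SOURCE B (Python) =====
-- def __fields_matching_any_keywords(keywords, fields):
--     """
--     Return fields that contain ANY of the keywords as substrings (case-insensitive), preserving fields order and deduping.
--     Transposed algorithm: one pass per keyword marks a boolean hit-mask over the fields,
--     then a single dedup pass emits the marked fields in order.
--     """
--     lows = [f.casefold() for f in fields]
--     hit = [False] * len(fields)
--     for k in keywords:
--         kl = k.casefold()
--         hit = [h or (kl in fl) for h, fl in zip(hit, lows)]
--     out = []
--     seen = set()
--     for f, h in zip(fields, hit):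
--         if h and f not in seen:
--             seen.add(f)
--             out.append(f)
--     return out
-- ===== Notes on version B (the rewrite author's own statement) =====
-- stated objective: alternative
-- what changed: B transposes the loop nest: instead of scanning all keywords inside each field (field-outer any()), it makes one pass per keyword that ORs a boolean hit-mask over the pre-casefolded fields, then a single final pass dedups and emits the marked fields in order.
import Mathlib
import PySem

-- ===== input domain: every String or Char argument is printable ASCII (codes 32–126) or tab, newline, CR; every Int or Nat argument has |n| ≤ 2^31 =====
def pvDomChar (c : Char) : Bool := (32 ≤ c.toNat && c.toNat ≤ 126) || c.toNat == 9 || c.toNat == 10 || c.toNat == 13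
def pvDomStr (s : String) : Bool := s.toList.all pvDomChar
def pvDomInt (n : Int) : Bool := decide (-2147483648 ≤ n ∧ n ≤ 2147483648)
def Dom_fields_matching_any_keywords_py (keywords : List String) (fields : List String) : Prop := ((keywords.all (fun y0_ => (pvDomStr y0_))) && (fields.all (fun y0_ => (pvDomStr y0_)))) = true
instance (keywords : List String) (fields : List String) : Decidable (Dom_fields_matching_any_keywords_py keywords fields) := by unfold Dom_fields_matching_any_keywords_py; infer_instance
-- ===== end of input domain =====

-- B replaces A's field-outer any()-over-keywords scan by a transposed loop nest: one pass per
-- keyword ORs a boolean hit-mask over the pre-casefolded fields, then a single dedup pass emits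
-- the marked fields in order (objective: alternative, same cost). str.casefold is ported as
-- PySem.Str.lower, which is exact on the ASCII domain these theorems are about.

-- ===== PORT A =====
def fields_matching_any_keywords_py (keywords : List String) (fields : List String) : List String :=
  let lowerFields := fields.map (fun f => (f, PySem.Str.lower f))
  let lowers := keywords.map (fun k => PySem.Str.lower k)
  (lowerFields.foldl (fun (st : PySem.Set String × List String) p =>
      if lowers.any (fun k => PySem.Str.isIn k p.2) then
        if !(PySem.Set.contains st.1 p.1) then (st.1.add p.1, st.2 ++ [p.1]) else st
      else st)
    (PySem.Set.empty, [])).2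

-- ===== PORT B =====
def fields_matching_any_keywords_py_alt (keywords : List String) (fields : List String) : List String :=
  let lows := fields.map (fun f => PySem.Str.lower f)
  let hit0 := List.replicate fields.length false
  let hit := keywords.foldl (fun h k =>
      let kl := PySem.Str.lower k
      List.zipWith (fun b fl => b || PySem.Str.isIn kl fl) h lows) hit0
  ((fields.zip hit).foldl (fun (st : List String × PySem.Set String) p =>
      if p.2 && !(PySem.Set.contains st.2 p.1) then (st.1 ++ [p.1], st.2.add p.1) else st)
    ([], PySem.Set.empty)).1

-- ===== PRECONDITION & SPEC =====
def Spec_fields_matching_any_keywords_py (keywords : List String) (fields : List String) (out : List String) : Prop := out = fields_matching_any_keywords_py_alt keywords fields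
instance (keywords : List String) (fields : List String) (out : List String) : Decidable (Spec_fields_matching_any_keywords_py keywords fields out) := by unfold Spec_fields_matching_any_keywords_py; infer_instance

-- ===== CLAIM (what is proved, stated in full; the proofs are below) =====
def Claim_equal_fields_matching_any_keywords_py : Prop := ∀ (keywords : List String) (fields : List String), Dom_fields_matching_any_keywords_py keywords fields → Spec_fields_matching_any_keywords_py keywords fields (fields_matching_any_keywords_py keywords fields)

-- ===== LEMMAS AND PROOFS =====

-- the per-field match predicate both programs decide
def pvMatch (keywords : List String) (f : String) : Bool :=
  keywords.any (fun k => PySem.Str.isIn (PySem.Str.lower k) (PySem.Str.lower f))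

-- zipWith respects pointwise-equal functions
theorem pv_zipWith_ext {α β γ : Type} (f g : α → β → γ) (hfg : ∀ a b, f a b = g a b) :
    ∀ (l1 : List α) (l2 : List β), List.zipWith f l1 l2 = List.zipWith g l1 l2 := by
  intro l1
  induction l1 with
  | nil => intro l2; simp
  | cons a t ih => intro l2; cases l2 <;> simp [hfg, ih]

-- zipWith projecting the left list is the identity when lengths agree
theorem pv_zipWith_left {α β : Type} :
    ∀ (l1 : List α) (l2 : List β), l1.length = l2.length →
      List.zipWith (fun a _ => a) l1 l2 = l1 := by
  intro l1
  induction l1 with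
  | nil => intro l2 _; simp
  | cons a t ih =>
    intro l2 hl
    cases l2 with
    | nil => simp at hl
    | cons b u => simp [ih u (by simpa using hl)]

-- composing two zipWith passes over the same right-hand list
theorem pv_zipWith_zipWith {α β γ δ : Type} (g : γ → β → δ) (f : α → β → γ) :
    ∀ (h : List α) (l : List β),
      List.zipWith g (List.zipWith f h l) l = List.zipWith (fun a b => g (f a b) b) h l := by
  intro h
  induction h with
  | nil => intro l; simp
  | cons a h ih => intro l; cases l <;> simp [ih]

-- the keyword loop computes the match mask (on any start mask of the right length)
theorem pv_mask_fold (lows : List String) :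
    ∀ (ks : List String) (h : List Bool), h.length = lows.length →
      ks.foldl (fun h k =>
          List.zipWith (fun b fl => b || PySem.Str.isIn (PySem.Str.lower k) fl) h lows) h
        = List.zipWith (fun b fl => b ||
            ks.any (fun k => PySem.Str.isIn (PySem.Str.lower k) fl)) h lows := by
  intro ks
  induction ks with
  | nil =>
    intro h hl
    simp only [List.foldl_nil, List.any_nil, Bool.or_false]
    exact (pv_zipWith_left h lows hl).symm
  | cons k ks ih =>
    intro h hl
    rw [List.foldl_cons, ih _ (by simp [hl]), pv_zipWith_zipWith]
    exact pv_zipWith_ext _ _ (fun a b => by simp [Bool.or_assoc]) h lows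

-- starting from all-false the mask is exactly the map of the predicate
theorem pv_mask_replicate (P : String → Bool) :
    ∀ (l : List String),
      List.zipWith (fun b fl => b || P fl) (List.replicate l.length false) l = l.map P := by
  intro l
  induction l with
  | nil => simp
  | cons a t ih => simp [List.replicate_succ, ih]

-- the two emit loops agree element by element
theorem pv_emit (keywords : List String) :
    ∀ (fs : List String) (seen : PySem.Set String) (out : List String),
      ((fs.map (fun f => (f, PySem.Str.lower f))).foldl
          (fun (st : PySem.Set String × List String) p =>
            if (keywords.map (fun k => PySem.Str.lower k)).any
                (fun k => PySem.Str.isIn k p.2) then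
              if !(PySem.Set.contains st.1 p.1) then (st.1.add p.1, st.2 ++ [p.1]) else st
            else st) (seen, out)).2
      = ((fs.map (fun f => (f, pvMatch keywords f))).foldl
          (fun (st : List String × PySem.Set String) p =>
            if p.2 && !(PySem.Set.contains st.2 p.1) then (st.1 ++ [p.1], st.2.add p.1) else st)
          (out, seen)).1 := by
  intro fs
  induction fs with
  | nil => intro seen out; simp
  | cons f t ih =>
    intro seen out
    simp only [List.map_cons, List.foldl_cons]
    have hm : (keywords.map (fun k => PySem.Str.lower k)).any
        (fun k => PySem.Str.isIn k (PySem.Str.lower f)) = pvMatch keywords f := by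
      simp only [List.any_map]; rfl
    rw [hm]
    by_cases h1 : pvMatch keywords f = true
    · by_cases h2 : PySem.Set.contains seen f = true
      · have h2' : f ∈ seen := (PySem.Set.contains_iff seen f).mp h2
        rw [if_pos h1, if_neg (by simp [h2']), if_neg (by simp [h1, h2'])]
        exact ih seen out
      · have h2' : f ∉ seen := fun hmem => h2 ((PySem.Set.contains_iff seen f).mpr hmem)
        rw [if_pos h1, if_pos (by simp [h2']), if_pos (by simp [h1, h2'])]
        exact ih (seen.add f) (out ++ [f])
    · simp only [Bool.not_eq_true] at h1
      rw [if_neg (by simp [h1]), if_neg (by simp [h1])]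
      exact ih seen out

-- ===== VERDICT (by name: the statement is the Claim_ definition above) =====
theorem fields_matching_any_keywords_py_spec : Claim_equal_fields_matching_any_keywords_py := by
  intro keywords fields _
  show fields_matching_any_keywords_py keywords fields
      = fields_matching_any_keywords_py_alt keywords fields
  unfold fields_matching_any_keywords_py fields_matching_any_keywords_py_alt
  dsimp only
  rw [show fields.length = (fields.map (fun f => PySem.Str.lower f)).length by simp,
      pv_mask_fold (fields.map (fun f => PySem.Str.lower f)) keywords _ (by simp),
      pv_mask_replicate, List.map_map]
  have hz : fields.zip (fields.map (fun f => pvMatch keywords f))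
      = fields.map (fun f => (f, pvMatch keywords f)) := by
    simpa using (@List.zip_map' String String Bool id (fun f => pvMatch keywords f) fields)
  rw [show ((fun fl => keywords.any (fun k => PySem.Str.isIn (PySem.Str.lower k) fl)) ∘
        (fun f => PySem.Str.lower f)) = (fun f => pvMatch keywords f) from rfl, hz]
  exact pv_emit keywords fields PySem.Set.empty []
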